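-- pv_equiv track=rewrite | github.com/yyynbone/Multidet | utils/analyze.py | get_iter_idx
-- ===== SOURCE A (Python) =====
-- def get_iter_idx(val_dict):
--     # except val mode
--     val_idx = []
--     train_v = []
--
--     for i, k in enumerate(val_dict['iter']):
--         if val_dict['mode'][i] == 'val':
--             val_idx.append(i)
--         else:
--             train_v.append(k)
--
--     # # filter_index =  v.index(v[0], -1)
--     # filter_count = train_v.count(train_v[0])
--     #
--     # # num, last = divmod( len(v), filter_count)
--     # if len(train_v) % filter_count:
--     #     filter_count -= 1
--     # return filter_count
--
--     last_idx =  train_v[::-1].index(train_v[0])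
--     return last_idx
-- ===== SOURCE B (Python) =====
-- def get_iter_idx(val_dict):
--     # except val mode
--     modes = val_dict['mode']
--     train_v = [k for i, k in enumerate(val_dict['iter']) if modes[i] != 'val']
--     first = train_v[0]
--     trailing = 0
--     for v in train_v[1:]:
--         trailing = 0 if v == first else trailing + 1
--     return trailing
-- ===== Notes on version B (the rewrite author's own statement) =====
-- stated objective: simpler
-- what changed: Replaces reversing train_v and calling list.index with a single forward pass that keeps a running count of elements seen since the most recent occurrence of the first entry.
-- outside the precondition, e.g. on get_iter_idx({}): A raises KeyError, B raises KeyError; on get_iter_idx({'iter': ['1', '2'], 'mode': ['train']}): A raises IndexError, B raises IndexError; on get_iter_idx({'iter': [], 'mode': []}): A raises IndexError, B raises IndexError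
import Mathlib
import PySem

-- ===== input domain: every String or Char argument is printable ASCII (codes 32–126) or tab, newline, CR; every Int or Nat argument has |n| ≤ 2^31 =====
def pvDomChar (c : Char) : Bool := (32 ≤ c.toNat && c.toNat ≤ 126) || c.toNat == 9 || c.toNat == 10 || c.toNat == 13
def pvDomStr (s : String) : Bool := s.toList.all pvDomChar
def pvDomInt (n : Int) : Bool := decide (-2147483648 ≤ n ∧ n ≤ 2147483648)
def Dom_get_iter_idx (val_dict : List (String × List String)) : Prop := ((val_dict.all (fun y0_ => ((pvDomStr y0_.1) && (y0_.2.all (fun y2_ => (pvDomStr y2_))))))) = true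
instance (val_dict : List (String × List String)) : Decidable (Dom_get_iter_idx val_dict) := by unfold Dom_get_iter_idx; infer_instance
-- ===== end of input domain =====

-- B replaces A's reverse-then-list.index step by one forward scan keeping a running
-- count of elements since the last occurrence of the first train entry (objective: simpler).

-- ===== PORT A =====
def get_iter_idx (val_dict : List (String × List String)) : Int :=
  match (PySem.Dict.mk val_dict).get? "iter", (PySem.Dict.mk val_dict).get? "mode" with
  | some iterL, some modeL =>
    -- for i, k in enumerate(val_dict['iter']): build (val_idx, train_v)
    let st := (PySem.List.enumerate iterL).foldl
      (fun (acc : List Int × List String) ik =>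
        if (PySem.List.pyGet? modeL ik.1).getD "" == "val" then (acc.1 ++ [ik.1], acc.2)
        else (acc.1, acc.2 ++ [ik.2]))
      ([], [])
    let train_v := st.2
    match PySem.List.pyGet? train_v 0 with
    | none => -1   -- Python: IndexError on train_v[0] (excluded by Pre_)
    | some first =>
      let rev := (PySem.List.slice? train_v none none (-1)).getD []   -- train_v[::-1]
      ((PySem.List.index? rev first).getD 0 : Nat)
  | _, _ => -1     -- Python: KeyError (excluded by Pre_)

-- ===== PORT B =====
def get_iter_idx_alt (val_dict : List (String × List String)) : Int :=
  let modes := (PySem.Dict.mk val_dict).getD "mode" []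
  let train_v := (PySem.List.enumerate ((PySem.Dict.mk val_dict).getD "iter" [])).filterMap
      (fun ik => if (PySem.List.pyGet? modes ik.1).getD "" != "val" then some ik.2 else none)
  match train_v with
  | [] => 0        -- Python: IndexError on train_v[0] (excluded by Pre_)
  | first :: rest =>
    rest.foldl (fun trailing v => if v == first then (0 : Int) else trailing + 1) 0

-- ===== PRECONDITION & SPEC =====
-- Pre_ holds exactly where Python A returns: both keys present, the 'mode' list at
-- least as long as 'iter' (else IndexError in the loop), and some mode among the
-- first len(iter) entries differs from 'val' (else train_v is empty and train_v[0]
-- raises IndexError).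
def Pre_get_iter_idx (val_dict : List (String × List String)) : Prop :=
  ((PySem.Dict.mk val_dict).get? "iter").isSome = true ∧
  ((PySem.Dict.mk val_dict).get? "mode").isSome = true ∧
  ((PySem.Dict.mk val_dict).getD "iter" []).length ≤ ((PySem.Dict.mk val_dict).getD "mode" []).length ∧
  ((((PySem.Dict.mk val_dict).getD "mode" []).take ((PySem.Dict.mk val_dict).getD "iter" []).length).any
      (fun m => m != "val")) = true
instance (val_dict : List (String × List String)) : Decidable (Pre_get_iter_idx val_dict) := by
  unfold Pre_get_iter_idx; infer_instance

def pvWitness_get_iter_idx : (List (String × List String)) :=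
  [("iter", ["1", "2", "3"]), ("mode", ["train", "val", "train"])]

def Spec_get_iter_idx (val_dict : List (String × List String)) (out : Int) : Prop := out = get_iter_idx_alt val_dict
instance (val_dict : List (String × List String)) (out : Int) : Decidable (Spec_get_iter_idx val_dict out) := by unfold Spec_get_iter_idx; infer_instance

-- ===== CLAIM (what is proved, stated in full; the proofs are below) =====
def Claim_equal_get_iter_idx : Prop := ∀ (val_dict : List (String × List String)), Dom_get_iter_idx val_dict → Pre_get_iter_idx val_dict → Spec_get_iter_idx val_dict (get_iter_idx val_dict)

-- ===== LEMMAS AND PROOFS =====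

-- A's loop: the second (train_v) component of the fold is a filterMap.
theorem foldl_snd_eq_filterMap (modeL : List String) :
    ∀ (l : List (Int × String)) (a : List Int) (t : List String),
    (l.foldl
      (fun (acc : List Int × List String) ik =>
        if (PySem.List.pyGet? modeL ik.1).getD "" == "val" then (acc.1 ++ [ik.1], acc.2)
        else (acc.1, acc.2 ++ [ik.2]))
      (a, t)).2
    = t ++ l.filterMap (fun ik => if (PySem.List.pyGet? modeL ik.1).getD "" != "val" then some ik.2 else none) := by
  intro l
  induction l with
  | nil => intro a t; simp
  | cons x xs ih =>
    intro a t
    simp only [List.foldl_cons, List.filterMap_cons]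
    simp only [beq_iff_eq, bne_iff_ne, ite_not] at ih
    by_cases h : (PySem.List.pyGet? modeL x.1).getD "" = "val"
    · simp [h, ih]
    · simp [h, ih]

-- reverse-then-index equals the forward trailing count.
theorem index_rev_eq_trail (first : String) (l : List String) :
    ((PySem.List.index? ((first :: l).reverse) first).getD 0 : Int)
    = l.foldl (fun trailing v => if v == first then (0 : Int) else trailing + 1) 0 := by
  induction l using List.reverseRecOn with
  | nil =>
    rw [show (first :: ([] : List String)).reverse = [first] by simp, PySem.List.index?_cons_self]
    simp
  | append_singleton l v ih =>
    rw [List.foldl_append]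
    have hrev : (first :: (l ++ [v])).reverse = v :: (first :: l).reverse := by simp
    rw [hrev]
    by_cases h : v = first
    · subst h
      rw [PySem.List.index?_cons_self]
      simp
    · rw [PySem.List.index?_cons_of_ne _ h]
      have hmem : first ∈ (first :: l).reverse := by simp
      have hsome : (PySem.List.index? ((first :: l).reverse) first).isSome = true := by
        rw [PySem.List.index?_isSome_iff]; exact hmem
      obtain ⟨k, hk⟩ := Option.isSome_iff_exists.mp hsome
      rw [hk] at ih ⊢
      have h' : (v == first) = false := by simp [h]
      simp only [Option.map_some, Option.getD_some, List.foldl_cons, List.foldl_nil, h',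
        Bool.false_eq_true, if_false]
      simp only [Option.getD_some] at ih
      omega

theorem get_iter_idx_spec : Claim_equal_get_iter_idx := by
  unfold Claim_equal_get_iter_idx
  intro val_dict _hdom hpre
  obtain ⟨h1, h2, h3, h4⟩ := hpre
  obtain ⟨iterL, hIter⟩ := Option.isSome_iff_exists.mp h1
  obtain ⟨modeL, hMode⟩ := Option.isSome_iff_exists.mp h2
  have hIterD : (PySem.Dict.mk val_dict).getD "iter" [] = iterL := by
    simp [PySem.Dict.getD, hIter]
  have hModeD : (PySem.Dict.mk val_dict).getD "mode" [] = modeL := by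
    simp [PySem.Dict.getD, hMode]
  rw [hIterD, hModeD] at h3 h4
  unfold Spec_get_iter_idx get_iter_idx get_iter_idx_alt
  rw [hIter, hMode, hIterD, hModeD]
  simp only [foldl_snd_eq_filterMap, List.nil_append]
  set tv := (PySem.List.enumerate iterL).filterMap
      (fun ik => if (PySem.List.pyGet? modeL ik.1).getD "" != "val" then some ik.2 else none) with htv
  -- tv is nonempty
  have hne : tv ≠ [] := by
    obtain ⟨m, hmmem, hmne⟩ := List.any_eq_true.mp h4
    obtain ⟨i, hi, hget⟩ := List.mem_take_iff_getElem.mp hmmem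
    have hilt : i < iterL.length := lt_of_lt_of_le hi (by simp)
    have hilt' : i < modeL.length := lt_of_lt_of_le hilt h3
    have hmem : ((i : Int), iterL[i]) ∈ PySem.List.enumerate iterL := by
      rw [PySem.List.mem_enumerate_iff]
      exact ⟨i, hilt, by simp⟩
    have : iterL[i] ∈ tv := by
      rw [htv]
      apply List.mem_filterMap.mpr
      refine ⟨((i : Int), iterL[i]), hmem, ?_⟩
      have : PySem.List.pyGet? modeL ((i : Int)) = some modeL[i] := by
        simp [hilt']
      simp only [this, Option.getD_some]
      have hm : modeL[i] = m := hget
      have hcond : ((modeL[i] != "val") = true) := by rw [hm]; exact hmne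
      simp [hcond]
    exact List.ne_nil_of_mem this
  obtain ⟨first, rest, htv2⟩ := List.exists_cons_of_ne_nil hne
  rw [htv2]
  have h0 : PySem.List.pyGet? (first :: rest) (0 : Int) = some first := by
    simp
  rw [h0]
  have hrev : (PySem.List.slice? (first :: rest) none none (-1)).getD [] = (first :: rest).reverse := by
    rw [PySem.List.slice?_none_none_neg_one]; rfl
  simp only [hrev]
  exact index_rev_eq_trail first rest
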